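-- pv_equiv track=rewrite | github.com/Amanuel94/contest_solution | Beautiful_grid.py | func
-- ===== SOURCE A (Python) =====
-- def opt(li):
--     return min(sum(li), 4 - sum(li))
--
-- def trim(grid):
--     grid = grid[1:-1]
--     i = 0
--     while i < len(grid):
--         grid[i] = grid[i][1:-1]
--         i+=1
--
--     return grid
--
-- def func(grid):
--     if len(grid) == 1:
--         return 0
--     elif len(grid) == 2:
--         grid[0].extend(grid[1])
--         return opt(grid[0])
--
--     else:
--         minimal = 0
--         n = len(grid)
--         for i in range(n-1):
--             minimal+= opt([grid[0][i], grid[i][n-1], grid[n-1][n-1-i], grid[n-1-i][0]])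
--         return minimal + func(trim(grid))
-- ===== SOURCE B (Python) =====
-- def func(grid):
--     n = len(grid)
--     total = 0
--     for l in range(n // 2):
--         top, bot = l, n - 1 - l
--         for i in range(bot - top):
--             s = grid[top][top + i] + grid[top + i][bot] + grid[bot][bot - i] + grid[bot - i][top]
--             total += min(s, 4 - s)
--     return total
-- ===== Notes on version B (the rewrite author's own statement) =====
-- stated objective: faster
-- what changed: A recursively peels the outer layer and rebuilds a fresh (n-2)x(n-2) grid at every level via trim (re-slicing every row); B sums the same corner quadruples in one double loop over layer index offsets into the original grid, copying nothing.
-- outside the precondition, e.g. on func([[1, 2], [3]]): A returns -2, B raises IndexError; on func([[1, 2, 3], [4, 5, 6]]): A returns -17, B returns -8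
import Mathlib
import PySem

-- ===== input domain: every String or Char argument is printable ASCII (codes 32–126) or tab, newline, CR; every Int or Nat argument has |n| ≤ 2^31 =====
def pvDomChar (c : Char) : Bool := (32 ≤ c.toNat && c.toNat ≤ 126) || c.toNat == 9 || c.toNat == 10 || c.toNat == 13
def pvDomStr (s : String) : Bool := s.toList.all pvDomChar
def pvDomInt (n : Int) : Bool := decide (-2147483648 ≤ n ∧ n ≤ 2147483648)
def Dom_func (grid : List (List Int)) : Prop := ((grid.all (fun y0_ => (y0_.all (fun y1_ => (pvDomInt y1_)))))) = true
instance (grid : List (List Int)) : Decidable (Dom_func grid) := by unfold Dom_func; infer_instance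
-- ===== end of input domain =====

-- B replaces A's copy-and-recurse layer peeling (trim builds a fresh (n-2)×(n-2) grid each level)
-- by a double loop over layer offsets into the original grid; return-value equivalence only:
-- A mutates its argument (grid[0].extend on a 2-row input), B does not.

-- ===== PORT A =====
def pvOpt (li : List Int) : Int := min li.sum (4 - li.sum)

-- trim: grid = grid[1:-1]; then each row replaced by row[1:-1] (the index loop is this map)
def pvTrim (grid : List (List Int)) : List (List Int) :=
  (PySem.List.slice grid (some 1) (some (-1))).map (fun row => PySem.List.slice row (some 1) (some (-1)))

-- xs[1:-1] computed (cited by func's termination proof, hence placed above the port)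
theorem pv_slice_1_neg1 {α : Type} (xs : List α) :
    PySem.List.slice xs (some 1) (some (-1)) = xs.tail.dropLast := by
  cases xs with
  | nil => rfl
  | cons a t =>
    simp [PySem.List.slice, PySem.List.clampIdx, List.dropLast_eq_take]
    split <;> omega

theorem pv_trim_length (g : List (List Int)) : (pvTrim g).length = g.length - 2 := by
  simp [pvTrim, pv_slice_1_neg1, List.length_tail]
  omega

def func (grid : List (List Int)) : Int :=
  if grid.length = 1 then 0
  else if grid.length = 2 then
    pvOpt (PySem.List.pyGetD grid 0 [] ++ PySem.List.pyGetD grid 1 [])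
  else if grid.length = 0 then 0  -- Python A diverges (infinite recursion) on []; outside Pre_
  else
    let n : Int := grid.length
    let minimal :=
      (PySem.List.pyRange 0 (n - 1) 1).foldl (fun acc i =>
        acc + pvOpt [PySem.List.pyGetD (PySem.List.pyGetD grid 0 []) i 0,
                     PySem.List.pyGetD (PySem.List.pyGetD grid i []) (n - 1) 0,
                     PySem.List.pyGetD (PySem.List.pyGetD grid (n - 1) []) (n - 1 - i) 0,
                     PySem.List.pyGetD (PySem.List.pyGetD grid (n - 1 - i) []) 0 0]) 0
    minimal + func (pvTrim grid)
termination_by grid.length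
decreasing_by
  rw [pv_trim_length]; omega

-- ===== PORT B =====
def func_alt (grid : List (List Int)) : Int :=
  let n : Int := grid.length
  (PySem.List.pyRange 0 (PySem.Int.floordiv n 2) 1).foldl (fun total l =>
    let top := l
    let bot := n - 1 - l
    (PySem.List.pyRange 0 (bot - top) 1).foldl (fun total i =>
      let s := PySem.List.pyGetD (PySem.List.pyGetD grid top []) (top + i) 0 +
               PySem.List.pyGetD (PySem.List.pyGetD grid (top + i) []) bot 0 +
               PySem.List.pyGetD (PySem.List.pyGetD grid bot []) (bot - i) 0 +
               PySem.List.pyGetD (PySem.List.pyGetD grid (bot - i) []) top 0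
      total + min s (4 - s)) total) 0

-- ===== PRECONDITION & SPEC =====
-- Pre_ excludes the empty grid (A recurses forever there) and non-square multi-row grids:
-- on those A either raises IndexError or its value depends on ragged-row trimming/summing
-- that no specification would fix (B raises or reads the square corner positions instead).
def Pre_func (grid : List (List Int)) : Prop :=
  grid ≠ [] ∧ (grid.length = 1 ∨ ∀ row ∈ grid, row.length = grid.length)
instance (grid : List (List Int)) : Decidable (Pre_func grid) := by unfold Pre_func; infer_instance

def pvWitness_func : List (List Int) := [[1, 0, 1], [0, 1, 0], [1, 1, 0]]

def Spec_func (grid : List (List Int)) (out : Int) : Prop := out = func_alt grid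
instance (grid : List (List Int)) (out : Int) : Decidable (Spec_func grid out) := by
  unfold Spec_func; infer_instance

-- ===== CLAIM (what is proved, stated in full; the proofs are below) =====
def Claim_equal_func : Prop :=
  ∀ (grid : List (List Int)), Dom_func grid → Pre_func grid → Spec_func grid (func grid)

-- ===== LEMMAS AND PROOFS =====

-- grid[r][c] as one operation
def pvG (g : List (List Int)) (r c : Int) : Int :=
  PySem.List.pyGetD (PySem.List.pyGetD g r []) c 0

-- one corner quadruple's cost, as B computes it
def pvTerm (g : List (List Int)) (top bot i : Int) : Int :=
  min (pvG g top (top + i) + pvG g (top + i) bot + pvG g bot (bot - i) + pvG g (bot - i) top)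
      (4 - (pvG g top (top + i) + pvG g (top + i) bot + pvG g bot (bot - i) + pvG g (bot - i) top))

-- one layer's total in B
def pvInner (g : List (List Int)) (n l : Int) : Int :=
  ((PySem.List.pyRange 0 (n - 1 - l - l) 1).map (fun i => pvTerm g l (n - 1 - l) i)).sum

theorem pv_alt_eq (g : List (List Int)) :
    func_alt g =
      ((PySem.List.pyRange 0 (PySem.Int.floordiv (g.length : Int) 2) 1).map
        (fun l => pvInner g (g.length : Int) l)).sum := by
  simp only [func_alt, pvInner, pvTerm, pvG, PySem.List.foldl_add, zero_add]

theorem pv_A_eq (g : List (List Int)) (h : 3 ≤ g.length) :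
    func g =
      ((PySem.List.pyRange 0 ((g.length : Int) - 1) 1).map
        (fun i => pvTerm g 0 ((g.length : Int) - 1) i)).sum + func (pvTrim g) := by
  rw [func.eq_def]
  rw [if_neg (by omega), if_neg (by omega), if_neg (by omega)]
  simp only [PySem.List.foldl_add, zero_add]
  congr 1
  apply congrArg
  apply List.map_congr_left
  intro i _
  simp only [pvOpt, pvTerm, pvG, List.sum_cons, List.sum_nil, zero_add, add_zero]
  congr 1 <;> ring

theorem pv_trim_pre (g : List (List Int)) (hsq : ∀ row ∈ g, row.length = g.length) :
    ∀ row ∈ pvTrim g, row.length = (pvTrim g).length := by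
  intro row hrow
  rw [pv_trim_length]
  simp only [pvTrim, List.mem_map] at hrow
  obtain ⟨r, hr, rfl⟩ := hrow
  have hrg : r ∈ g := PySem.List.mem_of_mem_slice _ _ _ hr
  rw [pv_slice_1_neg1, List.length_dropLast, List.length_tail, hsq r hrg]
  omega

theorem pvG_trim (g : List (List Int)) (hsq : ∀ row ∈ g, row.length = g.length)
    (r c : Int) (hr0 : 0 ≤ r) (hr : r < (g.length : Int) - 2)
    (hc0 : 0 ≤ c) (hc : c < (g.length : Int) - 2) :
    pvG (pvTrim g) r c = pvG g (r + 1) (c + 1) := by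
  have hn : 3 ≤ g.length := by omega
  have hlen : (g.tail.dropLast).length = g.length - 2 := by
    rw [List.length_dropLast, List.length_tail]; omega
  have h1 : (r + 1).toNat = r.toNat + 1 := by omega
  have h2 : (c + 1).toNat = c.toNat + 1 := by omega
  have hrg : r.toNat + 1 < g.length := by omega
  have hrowlen : (g[r.toNat + 1]'hrg).length = g.length := hsq _ (List.getElem_mem hrg)
  have hL : pvG (pvTrim g) r c = (g[r.toNat + 1]'hrg)[c.toNat + 1]'(by rw [hrowlen]; omega) := by
    unfold pvG pvTrim
    rw [pv_slice_1_neg1]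
    rw [PySem.List.pyGetD_eq_getElem _ _ hr0 (by rw [List.length_map, hlen]; omega)]
    simp only [List.getElem_map]
    rw [pv_slice_1_neg1]
    rw [List.getElem_dropLast, List.getElem_tail]
    rw [PySem.List.pyGetD_eq_getElem _ _ hc0
      (by rw [List.length_dropLast, List.length_tail, hrowlen]; omega)]
    rw [List.getElem_dropLast, List.getElem_tail]
  have hR : pvG g (r + 1) (c + 1) = (g[r.toNat + 1]'hrg)[c.toNat + 1]'(by rw [hrowlen]; omega) := by
    unfold pvG
    rw [PySem.List.pyGetD_eq_getElem g _ (by omega) (by omega)]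
    simp only [h1]
    rw [PySem.List.pyGetD_eq_getElem _ _ (by omega) (by rw [hrowlen]; omega)]
    simp only [h2]
  rw [hL, hR]

theorem pv_inner_shift (g : List (List Int)) (hsq : ∀ row ∈ g, row.length = g.length)
    (hn : 3 ≤ g.length) (k : Int) (hk0 : 0 ≤ k) :
    pvInner (pvTrim g) ((g.length : Int) - 2) k = pvInner g (g.length : Int) (k + 1) := by
  unfold pvInner
  have hb : (g.length : Int) - 2 - 1 - k - k = (g.length : Int) - 1 - (k + 1) - (k + 1) := by ring
  rw [hb]
  apply congrArg
  apply List.map_congr_left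
  intro i hi
  rw [PySem.List.mem_pyRange_one] at hi
  unfold pvTerm
  rw [pvG_trim g hsq k (k + i) hk0 (by omega) (by omega) (by omega)]
  rw [pvG_trim g hsq (k + i) ((g.length : Int) - 2 - 1 - k) (by omega) (by omega) (by omega) (by omega)]
  rw [pvG_trim g hsq ((g.length : Int) - 2 - 1 - k) ((g.length : Int) - 2 - 1 - k - i) (by omega) (by omega) (by omega) (by omega)]
  rw [pvG_trim g hsq ((g.length : Int) - 2 - 1 - k - i) k (by omega) (by omega) hk0 (by omega)]
  have e1 : k + 1 + i = k + i + 1 := by ring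
  have e2 : (g.length : Int) - 1 - (k + 1) = (g.length : Int) - 2 - 1 - k + 1 := by ring
  have e3 : (g.length : Int) - 1 - (k + 1) - i = (g.length : Int) - 2 - 1 - k - i + 1 := by ring
  rw [e1, e3, e2]

theorem pv_peel (g : List (List Int)) (hsq : ∀ row ∈ g, row.length = g.length)
    (hn : 3 ≤ g.length) :
    func_alt g = pvInner g (g.length : Int) 0 + func_alt (pvTrim g) := by
  rw [pv_alt_eq g, pv_alt_eq (pvTrim g)]
  have hm : ((pvTrim g).length : Int) = (g.length : Int) - 2 := by
    rw [pv_trim_length]; omega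
  have hfd : PySem.Int.floordiv ((g.length : Int)) 2 = (g.length : Int) / 2 :=
    PySem.Int.floordiv_eq_ediv_of_pos (by omega)
  have hfd2 : PySem.Int.floordiv ((g.length : Int) - 2) 2 = (g.length : Int) / 2 - 1 := by
    rw [PySem.Int.floordiv_eq_ediv_of_pos (by omega)]; omega
  rw [PySem.List.pyRange_one_cons (by rw [hfd]; omega)]
  rw [List.map_cons, List.sum_cons]
  congr 1
  rw [hm, hfd2, hfd]
  rw [PySem.List.pyRange_one, PySem.List.pyRange_one]
  have hcnt : ((g.length : Int) / 2 - 1 - 0).toNat = ((g.length : Int) / 2 - (0 + 1)).toNat := by omega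
  rw [List.map_map, List.map_map, hcnt]
  apply congrArg
  apply List.map_congr_left
  intro j _
  simp only [Function.comp_apply, zero_add]
  rw [pv_inner_shift g hsq hn j (by omega)]
  congr 1
  omega

theorem pv_shape2 (g : List (List Int)) (h : g.length = 2)
    (hsq : ∀ row ∈ g, row.length = g.length) :
    ∃ a b c d : Int, g = [[a, b], [c, d]] := by
  match g with
  | [r1, r2] =>
    have h1 : r1.length = 2 := hsq r1 (by simp) |>.trans (by simp)
    have h2 : r2.length = 2 := hsq r2 (by simp) |>.trans (by simp)
    match r1, h1, r2, h2 with
    | [a, b], _, [c, d], _ => exact ⟨a, b, c, d, rfl⟩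

theorem pv_main (N : Nat) :
    ∀ g : List (List Int), g.length ≤ N → Pre_func g → func g = func_alt g := by
  induction N with
  | zero =>
    intro g hN hpre
    exact absurd (List.length_eq_zero_iff.mp (by omega)) hpre.1
  | succ N ih =>
    intro g hN ⟨hne, hsq'⟩
    by_cases h1 : g.length = 1
    · obtain ⟨r, rfl⟩ := List.length_eq_one_iff.mp h1
      rw [func.eq_def]
      norm_num [func_alt, PySem.Int.floordiv, PySem.List.pyRange,
        show Int.fdiv 1 2 = 0 from by decide]
    · have hsq : ∀ row ∈ g, row.length = g.length := hsq'.resolve_left h1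
      by_cases h2 : g.length = 2
      · obtain ⟨a, b, c, d, rfl⟩ := pv_shape2 g h2 hsq
        rw [func.eq_def]
        norm_num [func_alt, pvOpt, PySem.Int.floordiv, PySem.List.pyRange,
          PySem.List.pyGetD, PySem.List.pyGet?, PySem.List.pyIdx?,
          show Int.fdiv 2 2 = 1 from by decide]
        congr 1 <;> ring
      · have h3 : 3 ≤ g.length := by
          have : g.length ≠ 0 := fun h => hne (List.length_eq_zero_iff.mp h)
          omega
        have htpre : Pre_func (pvTrim g) := by
          refine ⟨?_, Or.inr (pv_trim_pre g hsq)⟩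
          intro h
          have := pv_trim_length g
          rw [h] at this
          simp at this
          omega
        have hih : func (pvTrim g) = func_alt (pvTrim g) := by
          apply ih _ _ htpre
          rw [pv_trim_length]; omega
        rw [pv_A_eq g h3, hih, pv_peel g hsq h3]
        congr 1
        unfold pvInner
        simp only [sub_zero]

-- ===== VERDICT (by name: the statement is the Claim_ definition above) =====
theorem func_spec : Claim_equal_func := by
  intro g _ hpre
  unfold Spec_func
  exact pv_main g.length g le_rfl hpre
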